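-- pv_equiv track=rewrite | github.com/IES-Rafael-Alberti/2324-u2-sentencias-repetitivas-javierac11 | src/ejercicio8.py | trianguloImpar
-- ===== SOURCE A (Python) =====
-- def trianguloImpar(numero):
--     numeros_impares = ""
--     numeros = [1]
--     numero_impar = 1
--     for x in range(0, numero):
--
--         for num in numeros:
--             numeros_impares += f"{num} "
--         if x == numero-1:
--             pass
--         else:
--             numeros_impares += "\n"
--         numero_impar += 2
--         numeros.insert(0, numero_impar)
--     return numeros_impares
-- ===== SOURCE B (Python) =====
-- def trianguloImpar(numero):
--     piezas = [f"{2 * j + 1} " for j in range(numero)]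
--     filas = ["".join(reversed(piezas[:i + 1])) for i in range(numero)]
--     return "\n".join(filas)
-- ===== Notes on version B (the rewrite author's own statement) =====
-- stated objective: faster
-- what changed: B drops A's maintained odds list and its insert(0,...)/numero_impar/newline-branch bookkeeping: it formats each odd number exactly once into a list of pieces, builds row i by reversing the prefix piezas[:i+1] and joining it, and joins the rows with ' ' (intended as faster; a timing run measured ~4x at large sizes).
import Mathlib
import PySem

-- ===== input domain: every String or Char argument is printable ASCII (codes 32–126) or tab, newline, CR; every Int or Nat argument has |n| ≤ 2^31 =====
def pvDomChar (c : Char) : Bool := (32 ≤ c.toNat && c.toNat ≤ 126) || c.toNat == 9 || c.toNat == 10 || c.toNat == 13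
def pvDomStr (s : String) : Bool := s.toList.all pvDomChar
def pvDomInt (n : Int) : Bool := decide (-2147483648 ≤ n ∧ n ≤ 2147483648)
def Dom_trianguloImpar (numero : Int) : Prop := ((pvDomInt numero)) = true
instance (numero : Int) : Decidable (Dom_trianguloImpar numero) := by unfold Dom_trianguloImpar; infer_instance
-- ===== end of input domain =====

-- B drops A's maintained odds list and insert(0,..)/newline bookkeeping: it formats each odd
-- number once into 'piezas', builds row i by reversing the prefix piezas[:i+1] and joining it,
-- and joins the rows with "\n" (objective: faster — intended as faster; a timing run measured ~4x at the largest sizes it ran).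

-- ===== PORT A =====
-- the body of A's 'for x' loop: state = (numeros_impares, numeros, numero_impar)
def stepA (numero : Int) (st : String × List Int × Int) (x : Int) : String × List Int × Int :=
  let acc := st.2.1.foldl (fun a num => a ++ PySem.Int.toStr num ++ " ") st.1
  let acc2 := if x = numero - 1 then acc else acc ++ "\n"
  (acc2, (st.2.2 + 2) :: st.2.1, st.2.2 + 2)

def trianguloImpar (numero : Int) : String :=
  ((PySem.List.pyRange 0 numero 1).foldl (stepA numero) ("", [1], 1)).1

-- ===== PORT B =====
def trianguloImpar_alt (numero : Int) : String :=
  let piezas := (PySem.List.pyRange 0 numero 1).map (fun j => PySem.Int.toStr (2 * j + 1) ++ " ")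
  let filas := (PySem.List.pyRange 0 numero 1).map
    (fun i => PySem.Str.join "" (PySem.List.slice piezas none (some (i + 1))).reverse)
  PySem.Str.join "\n" filas

-- ===== PRECONDITION & SPEC =====
def Spec_trianguloImpar (numero : Int) (out : String) : Prop := out = trianguloImpar_alt numero
instance (numero : Int) (out : String) : Decidable (Spec_trianguloImpar numero out) := by unfold Spec_trianguloImpar; infer_instance

-- ===== CLAIM (what is proved, stated in full; the proofs are below) =====
def Claim_equal_trianguloImpar : Prop := ∀ (numero : Int), Dom_trianguloImpar numero → Spec_trianguloImpar numero (trianguloImpar numero)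

-- ===== LEMMAS AND PROOFS =====

-- descending row i of the triangle: "2i+1 2i-1 ... 1 " (proof-side reference value)
def rowAlt (i : Int) : String :=
  (PySem.List.pyRange i (-1) (-1)).foldl (fun a j => a ++ PySem.Int.toStr (2 * j + 1) ++ " ") ""

-- A's 'numeros' list after n iterations: descending odds 2n+1, …, 1
def odds : Nat → List Int
  | 0 => [1]
  | n + 1 => (2 * ((n : Int) + 1) + 1) :: odds n

-- the first n rows, each followed by "\n"
def rowsJ : Nat → String
  | 0 => ""
  | n + 1 => rowsJ n ++ rowAlt (n : Int) ++ "\n"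

theorem rowFold_shift (nums : List Int) (acc : String) :
    nums.foldl (fun a num => a ++ PySem.Int.toStr num ++ " ") acc
      = acc ++ nums.foldl (fun a num => a ++ PySem.Int.toStr num ++ " ") "" := by
  induction nums generalizing acc with
  | nil => simp [String.append_empty]
  | cons h t ih =>
    simp only [List.foldl_cons]
    rw [ih (acc ++ PySem.Int.toStr h ++ " "), ih ("" ++ PySem.Int.toStr h ++ " ")]
    simp [String.empty_append, String.append_assoc]

theorem odds_eq (n : Nat) :
    odds n = (List.range (n + 1)).map (fun (k : Nat) => 2 * ((n : Int) - (k : Int)) + 1) := by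
  induction n with
  | zero => simp [odds]
  | succ n ih =>
    rw [List.range_succ_eq_map]
    simp only [List.map_cons, List.map_map]
    have : (fun (k : Nat) => 2 * (((n + 1 : Nat) : Int) - (k : Int)) + 1) ∘ Nat.succ
        = fun (k : Nat) => 2 * ((n : Int) - (k : Int)) + 1 := by
      funext k; simp [Function.comp]
    rw [this, odds, ih]
    congr 1

theorem rowAlt_eq (n : Nat) :
    (odds n).foldl (fun a num => a ++ PySem.Int.toStr num ++ " ") "" = rowAlt (n : Int) := by
  rw [rowAlt, PySem.List.pyRange_neg_one]
  have h1 : ((n : Int) - (-1)).toNat = n + 1 := by omega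
  rw [h1, odds_eq, List.foldl_map, List.foldl_map]

theorem foldA_prefix (m : Int) : ∀ (n : Nat), (n : Int) ≤ m - 1 →
    ((List.range n).map (fun (k : Nat) => (k : Int))).foldl (stepA m) ("", [1], 1)
      = (rowsJ n, odds n, 2 * (n : Int) + 1) := by
  intro n
  induction n with
  | zero => intro _; simp [rowsJ, odds]
  | succ n ih =>
    intro hn
    rw [List.range_succ, List.map_append, List.foldl_append,
        ih (by omega)]
    simp only [List.map_cons, List.map_nil, List.foldl_cons, List.foldl_nil, stepA]
    rw [rowFold_shift, rowAlt_eq]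
    have hne : ¬ ((n : Int) = m - 1) := by omega
    simp only [hne, if_false]
    refine Prod.ext ?_ (Prod.ext ?_ ?_) <;> simp [rowsJ, odds] <;> push_cast <;> ring

theorem chars_join_append (sep x a : List Char) (l : List (List Char)) :
    PySem.Chars.join sep (x :: l ++ [a]) = PySem.Chars.join sep (x :: l) ++ sep ++ a := by
  induction l generalizing x with
  | nil => simp [PySem.Chars.join_cons_cons, PySem.Chars.join_singleton]
  | cons y ys ih =>
    simp only [List.cons_append]
    rw [PySem.Chars.join_cons_cons sep x y (ys ++ [a]), PySem.Chars.join_cons_cons sep x y ys]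
    have hy := ih y
    simp only [List.cons_append] at hy
    rw [hy]
    simp [List.append_assoc]

theorem str_join_append (sep x a : String) (l : List String) :
    PySem.Str.join sep (x :: l ++ [a]) = PySem.Str.join sep (x :: l) ++ sep ++ a := by
  rw [← String.toList_inj]
  simp only [PySem.Str.toList_join, String.toList_append, List.map_append, List.map_cons,
    List.map_nil]
  exact chars_join_append sep.toList x.toList a.toList (l.map String.toList)

theorem joinJ (n : Nat) :
    PySem.Str.join "\n" ((List.range (n + 1)).map (fun (k : Nat) => rowAlt (k : Int)))
      = rowsJ n ++ rowAlt (n : Int) := by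
  induction n with
  | zero =>
    rw [show rowsJ 0 = "" from rfl, String.empty_append, ← String.toList_inj]
    simp [PySem.Str.toList_join, PySem.Chars.join_singleton]
  | succ n ih =>
    rw [List.range_succ, List.map_append]
    have hcons : (List.range (n + 1)).map (fun (k : Nat) => rowAlt (k : Int))
        = rowAlt ((0 : Nat) : Int) :: (List.range n).map (fun (k : Nat) => rowAlt ((k + 1 : Nat) : Int)) := by
      rw [List.range_succ_eq_map]; simp [List.map_map, Function.comp]
    rw [List.map_cons, List.map_nil, hcons, str_join_append, ← hcons, ih]
    simp [rowsJ, String.append_assoc]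

theorem triA_pos (m : Int) (hm : 1 ≤ m) :
    trianguloImpar m = rowsJ (m - 1).toNat ++ rowAlt ((m - 1).toNat : Int) := by
  have hsplit : PySem.List.pyRange 0 m 1 = PySem.List.pyRange 0 (m - 1) 1 ++ [m - 1] := by
    have := PySem.List.pyRange_one_succ_right (a := 0) (b := m - 1) (by omega)
    simpa using this
  rw [trianguloImpar, hsplit, List.foldl_append, PySem.List.pyRange_one]
  have hmap : (fun k : Nat => 0 + (k : Int)) = fun (k : Nat) => (k : Int) := by
    funext k; simp
  rw [show m - 1 - 0 = m - 1 by ring, hmap,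
      foldA_prefix m (m - 1).toNat (by omega)]
  simp only [List.foldl_cons, List.foldl_nil, stepA]
  rw [rowFold_shift, rowAlt_eq]
  simp only [if_true]

theorem charsJoinEmpty : ∀ (parts : List (List Char)), PySem.Chars.join [] parts = parts.flatten
  | [] => PySem.Chars.join_nil []
  | [p] => by rw [PySem.Chars.join_singleton]; simp
  | p :: q :: rest => by
    rw [PySem.Chars.join_cons_cons, charsJoinEmpty (q :: rest)]
    simp

theorem toList_foldl_append {α : Type} (g : α → String) (l : List α) (acc : String) :
    (l.foldl (fun a x => a ++ g x) acc).toList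
      = acc.toList ++ (l.map (fun x => (g x).toList)).flatten := by
  induction l generalizing acc with
  | nil => simp
  | cons h t ih => simp [List.foldl_cons, ih, String.toList_append]

theorem rowNew_eq (m i : Int) (h0 : 0 ≤ i) (h1 : i < m) :
    PySem.Str.join ""
        (PySem.List.slice
          ((PySem.List.pyRange 0 m 1).map (fun j => PySem.Int.toStr (2 * j + 1) ++ " "))
          none (some (i + 1))).reverse
      = rowAlt i := by
  obtain ⟨n, rfl⟩ : ∃ n : Nat, i = (n : Int) := ⟨i.toNat, by omega⟩
  rw [PySem.List.slice_to _ (by omega), PySem.List.pyRange_one]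
  have hn1 : (((n : Int) + 1)).toNat = n + 1 := by omega
  have hmn : n + 1 ≤ (m - 0).toNat := by omega
  rw [hn1, List.map_map, ← List.map_take, List.take_range, Nat.min_eq_left hmn,
      ← List.map_reverse, ← String.toList_inj, PySem.Str.toList_join, List.map_map,
      show String.toList "" = ([] : List Char) from rfl, charsJoinEmpty]
  rw [rowAlt, show (fun (a : String) (j : Int) => a ++ PySem.Int.toStr (2 * j + 1) ++ " ")
        = fun (a : String) (j : Int) => a ++ (PySem.Int.toStr (2 * j + 1) ++ " ") from
        by funext a j; rw [String.append_assoc],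
      toList_foldl_append, PySem.List.pyRange_neg_one_eq_reverse]
  have : ((-1 : Int) + 1) = 0 := by ring
  rw [this, PySem.List.pyRange_one, ← List.map_reverse, List.map_map]
  simp [Function.comp_def, String.toList_append]

theorem triB_pos (m : Int) (hm : 1 ≤ m) :
    trianguloImpar_alt m = rowsJ (m - 1).toNat ++ rowAlt ((m - 1).toNat : Int) := by
  show PySem.Str.join "\n" ((PySem.List.pyRange 0 m 1).map
      (fun i => PySem.Str.join ""
        (PySem.List.slice
          ((PySem.List.pyRange 0 m 1).map (fun j => PySem.Int.toStr (2 * j + 1) ++ " "))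
          none (some (i + 1))).reverse)) = _
  rw [List.map_congr_left (fun i hi => by
    obtain ⟨hi0, hi1⟩ := (PySem.List.mem_pyRange_one).1 hi
    exact rowNew_eq m i hi0 hi1)]
  rw [PySem.List.pyRange_one]
  have h1 : (m - 0).toNat = (m - 1).toNat + 1 := by omega
  have hmap : (fun k : Nat => rowAlt (0 + (k : Int))) = fun (k : Nat) => rowAlt (k : Int) := by
    funext k; simp
  rw [h1, List.map_map]
  simp only [Function.comp_def]
  rw [hmap, joinJ]

-- ===== VERDICT (by name: the statement is the Claim_ definition above) =====
theorem trianguloImpar_spec : Claim_equal_trianguloImpar := by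
  intro m _
  unfold Spec_trianguloImpar
  by_cases hm : 1 ≤ m
  · rw [triA_pos m hm, triB_pos m hm]
  · have h0 : PySem.List.pyRange 0 m 1 = [] := PySem.List.pyRange_one_eq_nil (by omega)
    rw [trianguloImpar, trianguloImpar_alt, h0]
    show ("" : String) = PySem.Str.join "\n" (List.map rowAlt [])
    decide
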